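-- pv_equiv track=rewrite | github.com/po4yka/RIPDPI | scripts/sync_host_packs.py | normalize_host_token
-- ===== SOURCE A (Python) =====
-- def normalize_host_token(token: str) -> str | None:
--     token = token.strip()
--     if not token:
--         return None
--
--     normalized_chars: list[str] = []
--     for char in token:
--         if "A" <= char <= "Z":
--             normalized_chars.append(char.lower())
--         elif "-" <= char <= "9" or "a" <= char <= "z":
--             normalized_chars.append(char)
--         else:
--             return None
--     return "".join(normalized_chars) or None
-- ===== SOURCE B (Python) =====
-- def normalize_host_token(token: str) -> str | None:
--     token = token.strip()
--     if not token:
--         return None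
--     if all("-" <= c <= "9" or "a" <= c <= "z" or "A" <= c <= "Z" for c in token):
--         return token.lower()
--     return None
-- ===== Notes on version B (the rewrite author's own statement) =====
-- stated objective: idiomatic
-- what changed: Replaces the char-by-char validate-and-build loop (with list accumulator and join) by a single all() membership test followed by one bulk str.lower() pass.
import Mathlib
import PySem

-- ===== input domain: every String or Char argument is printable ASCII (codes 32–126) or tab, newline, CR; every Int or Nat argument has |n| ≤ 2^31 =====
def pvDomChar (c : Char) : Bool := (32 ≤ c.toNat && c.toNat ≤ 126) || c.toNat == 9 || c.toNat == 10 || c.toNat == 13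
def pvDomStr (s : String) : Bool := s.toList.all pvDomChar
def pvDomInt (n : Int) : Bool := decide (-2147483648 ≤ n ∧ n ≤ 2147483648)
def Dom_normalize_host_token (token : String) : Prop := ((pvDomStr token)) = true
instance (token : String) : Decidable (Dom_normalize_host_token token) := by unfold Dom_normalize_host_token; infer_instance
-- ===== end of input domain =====

-- B replaces A's char-by-char validate-and-build loop by a single all-membership test
-- followed by one bulk lowercase pass (idiomatic decomposition; same cost).


-- ===== PORT A =====
-- A's for-loop with early return: builds the normalized chars front-to-back in an
-- accumulator (reversed at the end), returning none on the first invalid char.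
def nhtLoop (acc : List Char) : List Char → Option (List Char)
  | [] => some acc.reverse
  | c :: rest =>
    if 'A' ≤ c && c ≤ 'Z' then nhtLoop (PySem.Chars.lowerChar c :: acc) rest
    else if ('-' ≤ c && c ≤ '9') || ('a' ≤ c && c ≤ 'z') then nhtLoop (c :: acc) rest
    else none

def normalize_host_token (token : String) : Option String :=
  let t := PySem.Chars.strip token.toList
  if t = [] then none
  else
    match nhtLoop [] t with
    | none => none
    | some cs => if cs = [] then none else some (String.ofList cs)  -- "".join(...) or None

-- ===== PORT B =====
def nhtOk (c : Char) : Bool := ('-' ≤ c && c ≤ '9') || ('a' ≤ c && c ≤ 'z') || ('A' ≤ c && c ≤ 'Z')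

def normalize_host_token_alt (token : String) : Option String :=
  let t := PySem.Chars.strip token.toList
  if t = [] then none
  else if t.all nhtOk then some (String.ofList (PySem.Chars.lower t))
  else none

-- ===== PRECONDITION & SPEC =====
def Spec_normalize_host_token (token : String) (out : Option String) : Prop := out = normalize_host_token_alt token
instance (token : String) (out : Option String) : Decidable (Spec_normalize_host_token token out) := by unfold Spec_normalize_host_token; infer_instance

-- ===== CLAIM (what is proved, stated in full; the proofs are below) =====
def Claim_equal_normalize_host_token : Prop := ∀ (token : String), Dom_normalize_host_token token → Spec_normalize_host_token token (normalize_host_token token)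

-- ===== LEMMAS AND PROOFS =====

-- A valid char that is not uppercase is fixed by lowerChar.
theorem lowerChar_of_not_upper (c : Char) (h : ('A' ≤ c && c ≤ 'Z') = false) :
    PySem.Chars.lowerChar c = c := by
  simp [PySem.Chars.lowerChar, PySem.Chars.isupper, h]

-- Characterization of A's loop in terms of B's all-test and bulk lower.
theorem nhtLoop_eq (t : List Char) : ∀ acc : List Char,
    nhtLoop acc t = if t.all nhtOk then some (acc.reverse ++ PySem.Chars.lower t) else none := by
  induction t with
  | nil => intro acc; simp [nhtLoop, PySem.Chars.lower]
  | cons c rest ih =>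
    intro acc
    by_cases hu : ('A' ≤ c && c ≤ 'Z') = true
    · rw [nhtLoop, if_pos hu, ih]
      have hok : nhtOk c = true := by simp [nhtOk, hu]
      simp [hok, PySem.Chars.lower]
    · have hu' : ('A' ≤ c && c ≤ 'Z') = false := by simpa using hu
      by_cases hv : (('-' ≤ c && c ≤ '9') || ('a' ≤ c && c ≤ 'z')) = true
      · rw [nhtLoop, if_neg (by simp [hu']), if_pos hv, ih]
        have hok : nhtOk c = true := by
          simp only [nhtOk]; simp only [Bool.or_eq_true] at hv ⊢; tauto
        simp [hok, PySem.Chars.lower, lowerChar_of_not_upper c hu']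
      · have hok : nhtOk c = false := by
          simp only [nhtOk]
          simp only [Bool.or_eq_true, not_or] at hv hu
          simp only [Bool.or_eq_false_iff]
          refine ⟨⟨?_, ?_⟩, by simpa using hu⟩ <;> simp_all
        rw [nhtLoop, if_neg (by simp [hu']), if_neg (by simp [hv])]
        simp [hok]

-- ===== VERDICT (by name: the statement is the Claim_ definition above) =====
theorem normalize_host_token_spec : Claim_equal_normalize_host_token := by
  intro token _
  unfold Spec_normalize_host_token normalize_host_token normalize_host_token_alt
  set t := PySem.Chars.strip token.toList with ht
  by_cases h0 : t = []
  · simp [h0]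
  · rw [if_neg h0, if_neg h0, nhtLoop_eq]
    by_cases hall : t.all nhtOk = true
    · rw [if_pos hall, if_pos hall]
      simp only [List.reverse_nil, List.nil_append]
      rw [if_neg (by simpa [PySem.Chars.lower] using h0)]
    · rw [if_neg hall, if_neg hall]
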